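-- pv_equiv track=rewrite | github.com/Engagic/engagic | agenda_chunker_template.py | _find_agenda_page_range
-- ===== SOURCE A (Python) =====
-- def _find_agenda_page_range(doc, toc):
--     """Determine which pages are the agenda (vs. attachments). Returns 0-indexed (start, end)."""
--     l1_pages = [entry[2] - 1 for entry in toc if entry[0] == 1]
--     if not l1_pages:
--         return 0, 0
--
--     # For flat TOC: agenda = first L1 page; memos start at the second distinct L1 page
--     distinct_sorted = sorted(set(l1_pages))
--
--     if len(distinct_sorted) >= 2:
--         # Agenda is the first page, memos start at second distinct page
--         return 0, distinct_sorted[1] - 1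
--
--     return 0, distinct_sorted[0]
-- ===== SOURCE B (Python) =====
-- def _find_agenda_page_range(doc, toc):
--     """Determine which pages are the agenda (vs. attachments). Returns 0-indexed (start, end)."""
--     min1 = None  # smallest level-1 page (0-indexed)
--     min2 = None  # smallest level-1 page strictly greater than min1
--     for entry in toc:
--         if entry[0] != 1:
--             continue
--         p = entry[2] - 1
--         if min1 is None or p < min1:
--             if min1 is not None and (min2 is None or min1 < min2):
--                 min2 = min1
--             min1 = p
--         elif p > min1 and (min2 is None or p < min2):
--             min2 = p
--     if min1 is None:
--         return 0, 0
--     if min2 is not None: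
--         return 0, min2 - 1
--     return 0, min1
-- ===== Notes on version B (the rewrite author's own statement) =====
-- stated objective: alternative
-- what changed: Replaces build-list + set + sort + index with one linear pass over the TOC maintaining the smallest distinct page and the smallest page strictly above it; no intermediate list, set or sort.
import Mathlib
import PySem

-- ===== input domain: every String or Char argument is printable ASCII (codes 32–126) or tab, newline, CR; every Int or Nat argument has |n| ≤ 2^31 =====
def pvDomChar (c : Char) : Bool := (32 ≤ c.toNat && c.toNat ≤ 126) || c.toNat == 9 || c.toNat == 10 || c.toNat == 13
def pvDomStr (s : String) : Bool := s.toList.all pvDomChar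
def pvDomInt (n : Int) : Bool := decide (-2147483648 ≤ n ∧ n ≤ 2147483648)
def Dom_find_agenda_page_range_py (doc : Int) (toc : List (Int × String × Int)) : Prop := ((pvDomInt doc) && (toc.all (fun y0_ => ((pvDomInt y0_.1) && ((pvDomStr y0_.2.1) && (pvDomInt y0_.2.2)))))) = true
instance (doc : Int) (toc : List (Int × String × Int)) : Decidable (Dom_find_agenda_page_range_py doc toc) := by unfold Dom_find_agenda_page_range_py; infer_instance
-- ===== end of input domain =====

-- B replaces build-list + set + sort + index by one linear pass keeping the smallest
-- distinct level-1 page and the smallest one strictly above it (alternative, no sort).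


-- ===== PORT A =====
def find_agenda_page_range_py (doc : Int) (toc : List (Int × String × Int)) : Int × Int :=
  let l1_pages := (toc.filter (fun e => e.1 == 1)).map (fun e => e.2.2 - 1)
  if l1_pages = [] then (0, 0)
  else
    let distinct_sorted := PySem.List.sorted (PySem.Set.ofList l1_pages) (fun x => x) false
    -- 'len >= 2' / safe indexing [1], [0] written as a match on the sorted list
    match distinct_sorted with
    | b0 :: b1 :: _ => (0, b1 - 1)
    | [b0] => (0, b0)
    | [] => (0, 0)  -- unreachable: l1_pages nonempty

-- ===== PORT B =====
-- one fold step per TOC entry: maintain (min1, min2) exactly as Source B's loop body does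
def pvAltStep (s : Option Int × Option Int) (e : Int × String × Int) : Option Int × Option Int :=
  if e.1 ≠ 1 then s
  else
    let p := e.2.2 - 1
    match s with
    | (none, m2) => (some p, m2)
    | (some m1, m2) =>
      if p < m1 then
        (some p, match m2 with
                 | none => some m1
                 | some b => if m1 < b then some m1 else some b)
      else if m1 < p then
        (some m1, match m2 with
                  | none => some p
                  | some b => if p < b then some p else some b)
      else (some m1, m2)

def find_agenda_page_range_py_alt (doc : Int) (toc : List (Int × String × Int)) : Int × Int :=
  match toc.foldl pvAltStep (none, none) with
  | (none, _) => (0, 0)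
  | (some m1, none) => (0, m1)
  | (some _, some m2) => (0, m2 - 1)

-- ===== PRECONDITION & SPEC =====
def Spec_find_agenda_page_range_py (doc : Int) (toc : List (Int × String × Int)) (out : Int × Int) : Prop := out = find_agenda_page_range_py_alt doc toc
instance (doc : Int) (toc : List (Int × String × Int)) (out : Int × Int) : Decidable (Spec_find_agenda_page_range_py doc toc out) := by unfold Spec_find_agenda_page_range_py; infer_instance

-- ===== CLAIM (what is proved, stated in full; the proofs are below) =====
def Claim_equal_find_agenda_page_range_py : Prop := ∀ (doc : Int) (toc : List (Int × String × Int)), Dom_find_agenda_page_range_py doc toc → Spec_find_agenda_page_range_py doc toc (find_agenda_page_range_py doc toc)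

-- ===== LEMMAS AND PROOFS =====

-- the state of Source B's loop over the pure list of pages
def pvIntStep (s : Option Int × Option Int) (p : Int) : Option Int × Option Int :=
  match s with
  | (none, m2) => (some p, m2)
  | (some m1, m2) =>
    if p < m1 then
      (some p, match m2 with
               | none => some m1
               | some b => if m1 < b then some m1 else some b)
    else if m1 < p then
      (some m1, match m2 with
                | none => some p
                | some b => if p < b then some p else some b)
    else (some m1, m2)

-- the fold over toc is the fold of pvIntStep over the extracted page list
theorem pvFoldEq (toc : List (Int × String × Int)) (s : Option Int × Option Int) :
    toc.foldl pvAltStep s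
      = ((toc.filter (fun e => e.1 == 1)).map (fun e => e.2.2 - 1)).foldl pvIntStep s := by
  induction toc generalizing s with
  | nil => rfl
  | cons e t ih =>
    by_cases h : e.1 = 1
    · simp [List.foldl, pvAltStep, pvIntStep, h, ih]
    · simp [List.foldl, pvAltStep, h, ih]

-- invariant of Source B's loop: min1 is the minimum of the seen pages, min2 the
-- minimum of the seen pages strictly above min1 (none if there is none)
def pvInv (seen : List Int) (s : Option Int × Option Int) : Prop :=
  match s with
  | (none, m2) => seen = [] ∧ m2 = none
  | (some a, m2) =>
    a ∈ seen ∧ (∀ x ∈ seen, a ≤ x) ∧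
    (match m2 with
     | none => ∀ x ∈ seen, x = a
     | some b => b ∈ seen ∧ a < b ∧ ∀ x ∈ seen, a < x → b ≤ x)

theorem pvInv_step (seen : List Int) (s : Option Int × Option Int) (p : Int)
    (h : pvInv seen s) : pvInv (seen ++ [p]) (pvIntStep s p) := by
  obtain ⟨m1, m2⟩ := s
  cases m1 with
  | none =>
    obtain ⟨h1, h2⟩ := h
    subst h1 h2
    simp [pvIntStep, pvInv]
  | some a =>
    obtain ⟨ha, hmin, hm2⟩ := h
    cases m2 with
    | none =>
      have hall : ∀ x ∈ seen, x = a := hm2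
      simp only [pvIntStep]
      by_cases h1 : p < a
      · simp only [if_pos h1, pvInv]
        refine ⟨by simp, ?_, ?_⟩
        · intro x hx
          rcases List.mem_append.1 hx with hx | hx
          · have := hall x hx; omega
          · simp at hx; omega
        · refine ⟨by simp [ha], h1, ?_⟩
          intro x hx hpx
          rcases List.mem_append.1 hx with hx | hx
          · have := hall x hx; omega
          · simp at hx; omega
      · by_cases h2 : a < p
        · simp only [if_neg h1, if_pos h2, pvInv]
          refine ⟨by simp [ha], ?_, by simp [ha], h2, ?_⟩
          · intro x hx
            rcases List.mem_append.1 hx with hx | hx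
            · exact hmin x hx
            · simp at hx; omega
          · intro x hx hax
            rcases List.mem_append.1 hx with hx | hx
            · have := hall x hx; omega
            · simp at hx; omega
        · have hpa : p = a := by omega
          simp only [if_neg h1, if_neg h2, pvInv]
          refine ⟨by simp [ha], ?_, ?_⟩
          · intro x hx
            rcases List.mem_append.1 hx with hx | hx
            · exact hmin x hx
            · simp at hx; omega
          · intro x hx
            rcases List.mem_append.1 hx with hx | hx
            · exact hall x hx
            · simp at hx; omega
    | some b =>
      obtain ⟨hb, hab, hbmin⟩ := hm2
      simp only [pvIntStep]
      by_cases h1 : p < a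
      · simp only [if_pos h1]
        by_cases h3 : a < b
        · simp only [if_pos h3, pvInv]
          refine ⟨by simp, ?_, by simp [ha], h1, ?_⟩
          · intro x hx
            rcases List.mem_append.1 hx with hx | hx
            · have := hmin x hx; omega
            · simp at hx; omega
          · intro x hx hpx
            rcases List.mem_append.1 hx with hx | hx
            · have := hmin x hx; omega
            · simp at hx; omega
        · omega
      · by_cases h2 : a < p
        · simp only [if_neg h1, if_pos h2]
          by_cases h3 : p < b
          · simp only [if_pos h3, pvInv]
            refine ⟨by simp [ha], ?_, by simp, h2, ?_⟩
            · intro x hx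
              rcases List.mem_append.1 hx with hx | hx
              · exact hmin x hx
              · simp at hx; omega
            · intro x hx hax
              rcases List.mem_append.1 hx with hx | hx
              · have := hbmin x hx hax; omega
              · simp at hx; omega
          · simp only [if_neg h3, pvInv]
            refine ⟨by simp [ha], ?_, by simp [hb], hab, ?_⟩
            · intro x hx
              rcases List.mem_append.1 hx with hx | hx
              · exact hmin x hx
              · simp at hx; omega
            · intro x hx hax
              rcases List.mem_append.1 hx with hx | hx
              · exact hbmin x hx hax
              · simp at hx; omega
        · have hpa : p = a := by omega
          simp only [if_neg h1, if_neg h2, pvInv]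
          refine ⟨by simp [ha], ?_, by simp [hb], hab, ?_⟩
          · intro x hx
            rcases List.mem_append.1 hx with hx | hx
            · exact hmin x hx
            · simp at hx; omega
          · intro x hx hax
            rcases List.mem_append.1 hx with hx | hx
            · exact hbmin x hx hax
            · simp at hx; omega

theorem pvInv_foldl (l : List Int) (seen : List Int) (s : Option Int × Option Int)
    (h : pvInv seen s) : pvInv (seen ++ l) (l.foldl pvIntStep s) := by
  induction l generalizing seen s with
  | nil => simpa using h
  | cons p t ih =>
    have := ih (seen ++ [p]) (pvIntStep s p) (pvInv_step seen s p h)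
    simpa [List.foldl] using this

theorem pvInv_final (l : List Int) : pvInv l (l.foldl pvIntStep (none, none)) := by
  have := pvInv_foldl l [] (none, none) (by simp [pvInv])
  simpa using this

-- ===== VERDICT (by name: the statement is the Claim_ definition above) =====
theorem find_agenda_page_range_py_spec : Claim_equal_find_agenda_page_range_py := by
  intro doc toc _
  unfold Spec_find_agenda_page_range_py find_agenda_page_range_py find_agenda_page_range_py_alt
  set L := (toc.filter (fun e => e.1 == 1)).map (fun e => e.2.2 - 1) with hL
  rw [pvFoldEq, ← hL]
  have hinv := pvInv_final L
  by_cases hnil : L = []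
  · rw [hnil]
    simp
  · simp only [if_neg hnil]
    set ds := PySem.List.sorted (PySem.Set.ofList L) (fun x => x) false with hds
    have hmem : ∀ x, x ∈ ds ↔ x ∈ L := by
      intro x
      rw [hds, PySem.List.mem_sorted, PySem.Set.mem_ofList]
    have hpw : ds.Pairwise (· < ·) := PySem.List.sorted_ofList_pairwise_lt L
    rcases hE : (L.foldl pvIntStep (none, none)) with ⟨m1, m2⟩
    rw [hE] at hinv
    cases m1 with
    | none =>
      obtain ⟨h1, _⟩ := hinv
      exact absurd h1 hnil
    | some a =>
      obtain ⟨ha, hminA, hm2⟩ := hinv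
      match hds' : ds with
      | [] =>
        exfalso
        have := (hmem a).2 ha
        simp [hds'] at this
      | [c] =>
        have hallc : ∀ x ∈ L, x = c := by
          intro x hx
          have := (hmem x).2 hx
          simp [hds'] at this
          exact this
        have hac : a = c := hallc a ha
        cases m2 with
        | none => simp [hac]
        | some b =>
          exfalso
          obtain ⟨hb, hab, _⟩ := hm2
          have := hallc b hb
          omega
      | c :: d :: t =>
        have hcL : c ∈ L := (hmem c).1 (by simp [hds'])
        have hdL : d ∈ L := (hmem d).1 (by simp [hds'])
        have hcd : c < d := (List.pairwise_cons.1 hpw).1 d (by simp)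
        have hcmin : ∀ x ∈ L, c ≤ x := by
          intro x hx
          have hxds : x ∈ c :: d :: t := (hmem x).2 hx
          rcases List.mem_cons.1 hxds with hxc | hxs
          · omega
          · have := (List.pairwise_cons.1 hpw).1 x hxs; omega
        have hdmin : ∀ x ∈ L, c < x → d ≤ x := by
          intro x hx hcx
          have hxds : x ∈ c :: d :: t := (hmem x).2 hx
          rcases List.mem_cons.1 hxds with hxc | hxs
          · omega
          · rcases List.mem_cons.1 hxs with hxd | hxt
            · omega
            · have hpw2 := (List.pairwise_cons.1 (List.pairwise_cons.1 hpw).2).1 x hxt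
              omega
        have hac : a = c := by
          have h1 := hminA c hcL
          have h2 := hcmin a ha
          omega
        cases m2 with
        | none =>
          exfalso
          have := hm2 d hdL
          omega
        | some b =>
          obtain ⟨hb, hab, hbmin⟩ := hm2
          have hbd : b = d := by
            have h1 := hbmin d hdL (by omega)
            have h2 := hdmin b hb (by omega)
            omega
          simp [hbd]
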